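-- pv_equiv track=rewrite | github.com/siddharthtiwari1/wc | reorganize_complete.py | find_section_boundaries
-- ===== SOURCE A (Python) =====
-- def find_section_boundaries(content, section_markers):
--     """Find start and end positions of sections"""
--     sections = {}
--     lines = content.split('\n')
--
--     for i, line in enumerate(lines):
--         for name, patterns in section_markers.items():
--             for pattern in patterns:
--                 if pattern in line:
--                     if name not in sections:
--                         sections[name] = {'start_line': i, 'start_pos': None}
--                     break
--
--     # Convert line numbers to character positions
--     pos = 0
--     line_positions = [0]
--     for line in lines:
--         pos += len(line) + 1  # +1 for newline
--         line_positions.append(pos)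
--
--     for name, info in sections.items():
--         if 'start_line' in info:
--             info['start_pos'] = line_positions[info['start_line']]
--
--     return sections
-- ===== SOURCE B (Python) =====
-- def find_section_boundaries(content, section_markers):
--     """Find start and end positions of sections (single pass, running char offset)"""
--     sections = {}
--     offset = 0
--     for i, line in enumerate(content.split('\n')):
--         for name, patterns in section_markers.items():
--             if name not in sections and any(pattern in line for pattern in patterns):
--                 sections[name] = {'start_line': i, 'start_pos': offset}
--         offset += len(line) + 1
--     return sections
-- ===== Notes on version B (the rewrite author's own statement) =====
-- stated objective: simpler
-- what changed: Single pass with a running character offset replaces A's three phases (match pass, line_positions table, fill-in pass); the per-line break loop becomes any().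
import Mathlib
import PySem

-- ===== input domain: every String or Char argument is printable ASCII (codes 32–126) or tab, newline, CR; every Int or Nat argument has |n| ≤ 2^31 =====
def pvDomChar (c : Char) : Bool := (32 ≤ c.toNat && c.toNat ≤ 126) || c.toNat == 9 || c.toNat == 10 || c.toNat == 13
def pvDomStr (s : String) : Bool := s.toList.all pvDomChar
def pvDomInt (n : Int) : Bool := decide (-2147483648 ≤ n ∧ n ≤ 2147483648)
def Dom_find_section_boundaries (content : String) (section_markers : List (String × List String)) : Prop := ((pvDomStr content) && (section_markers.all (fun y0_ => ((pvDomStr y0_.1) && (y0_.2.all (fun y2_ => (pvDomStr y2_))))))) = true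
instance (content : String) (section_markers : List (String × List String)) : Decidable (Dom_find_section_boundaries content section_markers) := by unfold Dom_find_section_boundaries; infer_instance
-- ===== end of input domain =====

-- B replaces A's three phases (match pass, line_positions table, fill-in pass) by one pass with a running char offset: simpler.


-- ===== PORT A =====
-- inner loop: for pattern in patterns: if pattern in line: if name not in sections: insert; break
def pvScanPats (line name : String) (i : Int) : List String → PySem.Dict String (List (String × Option Int)) → PySem.Dict String (List (String × Option Int))
  | [], s => s
  | p :: rest, s =>
    if PySem.Str.isIn p line then
      if s.contains name then s
      else s.insert name [("start_line", some i), ("start_pos", none)]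
    else pvScanPats line name i rest s

-- pos = 0; line_positions = [0]; for line in lines: pos += len(line)+1; line_positions.append(pos)
def pvLinePositions (lines : List String) : List Int :=
  (lines.foldl (fun st line => (st.1 + PySem.Str.len line + 1, st.2 ++ [st.1 + PySem.Str.len line + 1])) ((0 : Int), [(0 : Int)])).2

-- the final loop body: if 'start_line' in info: info['start_pos'] = line_positions[info['start_line']]
-- (the '| _ => info' arm is unreachable: A always stores an int under 'start_line')
def pvFill (lp : List Int) (info : List (String × Option Int)) : List (String × Option Int) :=
  if (PySem.Dict.mk info).contains "start_line" then
    match (PySem.Dict.mk info).get? "start_line" with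
    | some (some i) => ((PySem.Dict.mk info).insert "start_pos" (PySem.List.pyGet? lp i)).items
    | _ => info
  else info

def find_section_boundaries (content : String) (section_markers : List (String × List String)) : List (String × List (String × Option Int)) :=
  let lines := ((PySem.Str.split? content "\n").getD [])  -- sep "\n" is non-empty, so split? is always some
  let sections := (PySem.List.enumerate lines 0).foldl
      (fun s il => section_markers.foldl (fun s' np => pvScanPats il.2 np.1 il.1 np.2 s') s)
      PySem.Dict.empty
  let lp := pvLinePositions lines
  sections.items.map (fun kv => (kv.1, pvFill lp kv.2))

-- ===== PORT B =====
-- for name, patterns in section_markers.items(): if name not in sections and any(...): insert with (i, offset)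
def pvLineB (section_markers : List (String × List String)) (i : Int) (line : String) (off : Int)
    (s : PySem.Dict String (List (String × Option Int))) : PySem.Dict String (List (String × Option Int)) :=
  section_markers.foldl (fun s' np =>
    if !s'.contains np.1 && np.2.any (fun p => PySem.Str.isIn p line) then
      s'.insert np.1 [("start_line", some i), ("start_pos", some off)]
    else s') s

def find_section_boundaries_alt (content : String) (section_markers : List (String × List String)) : List (String × List (String × Option Int)) :=
  let lines := ((PySem.Str.split? content "\n").getD [])  -- sep "\n" is non-empty, so split? is always some
  ((PySem.List.enumerate lines 0).foldl
    (fun st il => (st.1 + PySem.Str.len il.2 + 1, pvLineB section_markers il.1 il.2 st.1 st.2))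
    ((0 : Int), PySem.Dict.empty)).2.items

-- ===== PRECONDITION & SPEC =====
def Spec_find_section_boundaries (content : String) (section_markers : List (String × List String)) (out : List (String × List (String × Option Int))) : Prop := out = find_section_boundaries_alt content section_markers
instance (content : String) (section_markers : List (String × List String)) (out : List (String × List (String × Option Int))) : Decidable (Spec_find_section_boundaries content section_markers out) := by unfold Spec_find_section_boundaries; infer_instance

-- ===== CLAIM (what is proved, stated in full; the proofs are below) =====
def Claim_equal_find_section_boundaries : Prop := ∀ (content : String) (section_markers : List (String × List String)), Dom_find_section_boundaries content section_markers → Spec_find_section_boundaries content section_markers (find_section_boundaries content section_markers)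

-- ===== LEMMAS AND PROOFS =====

def pvOffs (ls : List String) : Int := (ls.map (fun l => PySem.Str.len l + 1)).sum

def pvPartials : List String → Int → List Int
  | [], _ => []
  | l :: ls, p => (p + PySem.Str.len l + 1) :: pvPartials ls (p + PySem.Str.len l + 1)

lemma pv_lp_fold (ls : List String) : ∀ (p : Int) (acc : List Int),
    (ls.foldl (fun st line => (st.1 + PySem.Str.len line + 1, st.2 ++ [st.1 + PySem.Str.len line + 1])) (p, acc)).2
      = acc ++ pvPartials ls p := by
  induction ls with
  | nil => intro p acc; simp [pvPartials]
  | cons l ls ih =>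
    intro p acc
    simp only [List.foldl_cons]
    rw [ih]
    simp [pvPartials]

lemma pvLinePositions_eq (ls : List String) : pvLinePositions ls = 0 :: pvPartials ls 0 := by
  unfold pvLinePositions
  rw [pv_lp_fold]
  rfl

lemma pvPartials_get (ls : List String) : ∀ (p : Int) (k : Nat), k < ls.length →
    (pvPartials ls p)[k]? = some (p + pvOffs (ls.take (k + 1))) := by
  induction ls with
  | nil => intro p k h; simp at h
  | cons l ls ih =>
    intro p k h
    cases k with
    | zero => simp [pvPartials, pvOffs, add_assoc]
    | succ k =>
      simp only [pvPartials, List.getElem?_cons_succ]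
      rw [ih _ k (by simpa using h)]
      simp [pvOffs]; ring_nf

lemma pv_lp_get (ls : List String) (k : Nat) (hk : k ≤ ls.length) :
    PySem.List.pyGet? (pvLinePositions ls) (k : Int) = some (pvOffs (ls.take k)) := by
  rw [PySem.List.pyGet?_natCast, pvLinePositions_eq]
  cases k with
  | zero => simp [pvOffs]
  | succ k =>
    simp only [List.getElem?_cons_succ]
    rw [pvPartials_get ls 0 k (by omega)]
    simp

def pvFillD (lp : List Int) (d : PySem.Dict String (List (String × Option Int))) : PySem.Dict String (List (String × Option Int)) :=
  PySem.Dict.mk (d.items.map (fun kv => (kv.1, pvFill lp kv.2)))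

lemma pv_contains_fillD (lp : List Int) (d : PySem.Dict String (List (String × Option Int))) (nm : String) :
    (pvFillD lp d).contains nm = d.contains nm := by
  cases d with
  | mk items => simp [pvFillD, PySem.Dict.contains_mk, List.any_map, Function.comp_def]

lemma pv_scan_eq (line name : String) (i : Int) (pats : List String) (s : PySem.Dict String (List (String × Option Int))) :
    pvScanPats line name i pats s =
      if pats.any (fun p => PySem.Str.isIn p line) && !s.contains name then
        s.insert name [("start_line", some i), ("start_pos", none)]
      else s := by
  induction pats with
  | nil => simp [pvScanPats]
  | cons p rest ih =>
    cases hp : PySem.Str.isIn p line with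
    | true =>
      simp only [pvScanPats, hp, if_true, List.any_cons, Bool.true_or, Bool.true_and]
      cases hc : s.contains name
      · simp
      · simp
    | false =>
      simp only [pvScanPats, hp, if_false, Bool.false_eq_true, List.any_cons, Bool.false_or]
      exact ih

lemma pv_fill_info (lp : List Int) (i o : Int) (h : PySem.List.pyGet? lp i = some o) :
    pvFill lp [("start_line", some i), ("start_pos", none)] = [("start_line", some i), ("start_pos", some o)] := by
  simp [pvFill, pysem, h]

lemma pv_fillD_insert (lp : List Int) (d : PySem.Dict String (List (String × Option Int))) (nm : String)
    (v : List (String × Option Int)) (hc : d.contains nm = false) :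
    pvFillD lp (d.insert nm v) = (pvFillD lp d).insert nm (pvFill lp v) := by
  apply PySem.Dict.ext
  rw [PySem.Dict.items_insert_of_not_contains _ _ (by rw [pv_contains_fillD]; exact hc)]
  simp [pvFillD, PySem.Dict.items_insert_of_not_contains _ _ hc]

lemma pv_fill_line (lp : List Int) (markers : List (String × List String)) (line : String) (i o : Int)
    (h : PySem.List.pyGet? lp i = some o) (s : PySem.Dict String (List (String × Option Int))) :
    pvFillD lp (markers.foldl (fun s' np => pvScanPats line np.1 i np.2 s') s)
      = pvLineB markers i line o (pvFillD lp s) := by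
  induction markers generalizing s with
  | nil => simp [pvLineB]
  | cons np rest ih =>
    simp only [List.foldl_cons, pvLineB] at *
    rw [pv_scan_eq]
    cases hc : s.contains np.1 with
    | true => rw [ih]; simp [hc, pv_contains_fillD]
    | false =>
      cases hm : np.2.any (fun p => PySem.Str.isIn p line) with
      | false => rw [ih]; simp [pv_contains_fillD]
      | true =>
        rw [if_pos (by simp), ih,
            pv_fillD_insert lp s np.1 _ hc, pv_fill_info lp i o h]
        simp [pv_contains_fillD, hc]

lemma pv_main (lp : List Int) (markers : List (String × List String)) :
    ∀ (rest : List String) (j : Nat) (o : Int) (s : PySem.Dict String (List (String × Option Int))),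
    (∀ k : Nat, k < rest.length → PySem.List.pyGet? lp ((j + k : Nat) : Int) = some (o + pvOffs (rest.take k))) →
    pvFillD lp ((PySem.List.enumerate rest (j : Int)).foldl
        (fun s' il => markers.foldl (fun s'' np => pvScanPats il.2 np.1 il.1 np.2 s'') s') s)
      = ((PySem.List.enumerate rest (j : Int)).foldl
          (fun st il => (st.1 + PySem.Str.len il.2 + 1, pvLineB markers il.1 il.2 st.1 st.2))
          (o, pvFillD lp s)).2 := by
  intro rest
  induction rest with
  | nil => intro j o s h; simp [PySem.List.enumerate_nil]
  | cons l rest ih =>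
    intro j o s h
    rw [PySem.List.enumerate_cons]
    simp only [List.foldl_cons]
    have h0 : PySem.List.pyGet? lp (j : Int) = some o := by
      have := h 0 (by simp)
      simpa [pvOffs] using this
    rw [← pv_fill_line lp markers l (j : Int) o h0 s]
    have hcast : ((j : Int) + 1) = ((j + 1 : Nat) : Int) := by push_cast; ring
    rw [hcast]
    apply ih (j + 1) (o + PySem.Str.len l + 1)
    intro k hk
    have hh := h (k + 1) (by simpa using Nat.succ_lt_succ hk)
    have harith : (j + (k + 1) : Nat) = (j + 1 + k : Nat) := by omega
    rw [harith] at hh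
    rw [hh]
    congr 1
    simp [pvOffs]
    ring

-- ===== VERDICT (by name: the statement is the Claim_ definition above) =====
theorem find_section_boundaries_spec : Claim_equal_find_section_boundaries := by
  intro content markers _
  unfold Spec_find_section_boundaries find_section_boundaries find_section_boundaries_alt
  simp only []
  set lines := ((PySem.Str.split? content "\n").getD [])  -- sep "\n" is non-empty, so split? is always some with hlines
  have hmain := pv_main (pvLinePositions lines) markers lines 0 0 PySem.Dict.empty ?_
  · have hempty : pvFillD (pvLinePositions lines) PySem.Dict.empty = PySem.Dict.empty := by
      rfl
    rw [hempty] at hmain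
    have : ((PySem.List.enumerate lines (0 : Nat) : List (Int × String))) = PySem.List.enumerate lines 0 := by norm_num
    rw [this] at hmain
    calc ((PySem.List.enumerate lines 0).foldl
          (fun s il => markers.foldl (fun s' np => pvScanPats il.2 np.1 il.1 np.2 s') s)
          PySem.Dict.empty).items.map (fun kv => (kv.1, pvFill (pvLinePositions lines) kv.2))
        = (pvFillD (pvLinePositions lines) ((PySem.List.enumerate lines 0).foldl
          (fun s il => markers.foldl (fun s' np => pvScanPats il.2 np.1 il.1 np.2 s') s)
          PySem.Dict.empty)).items := rfl
      _ = _ := by rw [hmain]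
  · intro k hk
    have := pv_lp_get lines k (le_of_lt hk)
    simpa using this
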